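-- pv_equiv track=rewrite | github.com/google/fuzzbench | analysis/generate_report.py | get_first_covered_killed
-- ===== SOURCE A (Python) =====
-- from collections import defaultdict
--
-- def get_first_covered_killed(results, timestamps_map):
--     """Get first covered and killed mutant."""
--     ordered_inputs = sorted(results, key=lambda x: timestamps_map[x[0]])
--     mut_result_times = defaultdict(lambda: {'seen': None, 'killed': None})
--     for ordered_input in ordered_inputs:
--         input_file_id, mut_id, skipped, killed = ordered_input[:4]
--         if skipped:
--             continue
--         if mut_id not in mut_result_times:
--             mut_result_times[mut_id]['seen'] = timestamps_map[input_file_id]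
--         if killed:
--             assert mut_id in mut_result_times
--             if mut_result_times[mut_id]['killed'] is None:
--                 mut_result_times[mut_id]['killed'] = timestamps_map[
--                     input_file_id]
--     return mut_result_times
-- ===== SOURCE B (Python) =====
-- from collections import defaultdict
--
--
-- def get_first_covered_killed(results, timestamps_map):
--     """Get first covered and killed mutant (single pass + small sort over mutants)."""
--     # mut_id -> (min timestamp, index of the earliest record reaching it, min killed timestamp or None)
--     best = {}
--     for idx, (input_file_id, mut_id, skipped, killed) in enumerate(results):
--         t = timestamps_map[input_file_id]
--         if skipped:
--             continue
--         entry = best.get(mut_id)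
--         if entry is None:
--             best[mut_id] = (t, idx, t if killed else None)
--         else:
--             seen_t, first_idx, killed_t = entry
--             if t < seen_t:
--                 seen_t, first_idx = t, idx
--             if killed and (killed_t is None or t < killed_t):
--                 killed_t = t
--             best[mut_id] = (seen_t, first_idx, killed_t)
--     mut_result_times = defaultdict(lambda: {'seen': None, 'killed': None})
--     for mut_id, (seen_t, _, killed_t) in sorted(best.items(),
--                                                 key=lambda kv: (kv[1][0], kv[1][1])):
--         mut_result_times[mut_id] = {'seen': seen_t, 'killed': killed_t}
--     return mut_result_times
-- ===== Notes on version B (the rewrite author's own statement) =====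
-- stated objective: faster
-- what changed: A sorts all results by timestamp and scans them in order; B makes one unsorted pass keeping per-mutant minima (first-seen time/index and min killed time) in a dict and then sorts only the distinct mutants by (first time, first index).
import Mathlib
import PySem

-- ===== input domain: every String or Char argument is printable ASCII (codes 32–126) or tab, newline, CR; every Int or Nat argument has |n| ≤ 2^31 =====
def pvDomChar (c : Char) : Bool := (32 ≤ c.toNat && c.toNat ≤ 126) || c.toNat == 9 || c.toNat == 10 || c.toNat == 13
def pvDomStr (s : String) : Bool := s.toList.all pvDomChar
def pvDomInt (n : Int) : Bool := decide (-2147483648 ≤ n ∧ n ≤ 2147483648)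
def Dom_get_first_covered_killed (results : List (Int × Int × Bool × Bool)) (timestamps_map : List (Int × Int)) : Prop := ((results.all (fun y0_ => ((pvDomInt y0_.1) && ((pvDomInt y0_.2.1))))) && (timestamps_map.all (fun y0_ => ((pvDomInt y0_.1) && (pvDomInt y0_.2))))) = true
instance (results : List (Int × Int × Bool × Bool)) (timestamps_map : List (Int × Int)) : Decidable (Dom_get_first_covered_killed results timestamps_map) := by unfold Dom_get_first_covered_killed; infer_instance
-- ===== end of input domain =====

-- B replaces A's sort-all-records-then-ordered-scan by a single unsorted pass keeping per-mutant
-- minima in a dict, followed by a sort over the distinct mutants only (objective: faster).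

abbrev PvRec : Type := Int × Int × Bool × Bool
abbrev PvElt : Type := Int × PvRec


def pvTs (tm : List (Int × Int)) (k : Int) : Int :=
  PySem.Dict.getD (PySem.Dict.mk tm) k 0

def pvInnerDefault : PySem.Dict String (Option Int) :=
  PySem.Dict.mk [("seen", none), ("killed", none)]

-- non-skip body of A's loop
-- ===== PORT A =====

def gfckStepA (tm : List (Int × Int)) (d : PySem.Dict Int (PySem.Dict String (Option Int)))
    (r : PvRec) : PySem.Dict Int (PySem.Dict String (Option Int)) :=
  if r.2.2.1 then d
  else
    let t := pvTs tm r.1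
    let d1 := if PySem.Dict.contains d r.2.1 then d
      else PySem.Dict.modify d r.2.1 pvInnerDefault (fun inner => PySem.Dict.insert inner "seen" (some t))
    if r.2.2.2 then
      if PySem.Dict.getD (PySem.Dict.getD d1 r.2.1 pvInnerDefault) "killed" none = none then
        PySem.Dict.modify d1 r.2.1 pvInnerDefault (fun inner => PySem.Dict.insert inner "killed" (some t))
      else d1
    else d1

def get_first_covered_killed (results : List (Int × Int × Bool × Bool)) (timestamps_map : List (Int × Int)) : List (Int × List (String × Option Int)) :=
  let ordered := PySem.List.sorted results (fun x => pvTs timestamps_map x.1)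
  let d := ordered.foldl (gfckStepA timestamps_map) PySem.Dict.empty
  (PySem.Dict.items d).map (fun kv => (kv.1, PySem.Dict.items kv.2))

-- ===== PORT B =====

def gfckStepB (tm : List (Int × Int)) (b : PySem.Dict Int (Int × Int × Option Int))
    (p : PvElt) : PySem.Dict Int (Int × Int × Option Int) :=
  let t := pvTs tm p.2.1
  if p.2.2.2.1 then b
  else
    match PySem.Dict.get? b p.2.2.1 with
    | none => PySem.Dict.insert b p.2.2.1 (t, p.1, if p.2.2.2.2 then some t else none)
    | some e =>
      let s := if t < e.1 then (t, p.1) else (e.1, e.2.1)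
      let k := if p.2.2.2.2 then
          match e.2.2 with
          | none => some t
          | some c => if t < c then some t else some c
        else e.2.2
      PySem.Dict.insert b p.2.2.1 (s.1, s.2, k)

def get_first_covered_killed_alt (results : List (Int × Int × Bool × Bool)) (timestamps_map : List (Int × Int)) : List (Int × List (String × Option Int)) :=
  let best := (PySem.List.enumerate results 0).foldl (gfckStepB timestamps_map) PySem.Dict.empty
  let ordered := PySem.List.sorted2 (PySem.Dict.items best) (fun kv => kv.2.1) (fun kv => kv.2.2.1)
  let out := ordered.foldl
      (fun o kv => PySem.Dict.insert o kv.1 (PySem.Dict.mk [("seen", some kv.2.1), ("killed", kv.2.2.2)]))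
      PySem.Dict.empty
  (PySem.Dict.items out).map (fun kv => (kv.1, PySem.Dict.items kv.2))


-- ===== PRECONDITION & SPEC =====

-- Python A raises KeyError (inside the sort key) whenever some record's input_file_id is missing
-- from timestamps_map; exactly those inputs are excluded (B evaluates the same lookup and raises too).
def Pre_get_first_covered_killed (results : List (Int × Int × Bool × Bool)) (timestamps_map : List (Int × Int)) : Prop :=
  (results.all (fun r => PySem.Dict.contains (PySem.Dict.mk timestamps_map) r.1)) = true

instance (results : List (Int × Int × Bool × Bool)) (timestamps_map : List (Int × Int)) : Decidable (Pre_get_first_covered_killed results timestamps_map) := by unfold Pre_get_first_covered_killed; infer_instance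

def pvWitness_get_first_covered_killed : (List (Int × Int × Bool × Bool)) × (List (Int × Int)) :=
  ([(0, 1, false, true), (1, 1, false, false), (0, 2, true, false)], [(0, 5), (1, 3)])

def Spec_get_first_covered_killed (results : List (Int × Int × Bool × Bool)) (timestamps_map : List (Int × Int)) (out : List (Int × List (String × Option Int))) : Prop := out = get_first_covered_killed_alt results timestamps_map

instance (results : List (Int × Int × Bool × Bool)) (timestamps_map : List (Int × Int)) (out : List (Int × List (String × Option Int))) : Decidable (Spec_get_first_covered_killed results timestamps_map out) := by unfold Spec_get_first_covered_killed; infer_instance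

-- ===== CLAIM =====

def Claim_equal_get_first_covered_killed : Prop := ∀ (results : List (Int × Int × Bool × Bool)) (timestamps_map : List (Int × Int)), Dom_get_first_covered_killed results timestamps_map → Pre_get_first_covered_killed results timestamps_map → Spec_get_first_covered_killed results timestamps_map (get_first_covered_killed results timestamps_map)

-- ===== LEMMAS AND PROOFS =====



def pvLt {α : Type} (k1 k2 : α → Int) (a b : α) : Prop :=
  k1 a < k1 b ∨ (k1 a = k1 b ∧ k2 a < k2 b)

def pvLtB {α : Type} (k1 k2 : α → Int) (a b : α) : Bool :=
  decide (k1 a < k1 b) || (!decide (k1 b < k1 a) && decide (k2 a < k2 b))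

theorem pvLtB_iff {α : Type} (k1 k2 : α → Int) (a b : α) :
    pvLtB k1 k2 a b = true ↔ pvLt k1 k2 a b := by
  simp [pvLtB, pvLt]; omega

theorem pvLt_of_ltB_false {α : Type} (k1 k2 : α → Int) {a b : α}
    (h : pvLtB k1 k2 a b = false) (hne : k2 a ≠ k2 b) : pvLt k1 k2 b a := by
  simp [pvLtB] at h; simp [pvLt]; omega

theorem pvLt_trans {α : Type} (k1 k2 : α → Int) {a b c : α}
    (h1 : pvLt k1 k2 a b) (h2 : pvLt k1 k2 b c) : pvLt k1 k2 a c := by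
  simp [pvLt] at *; omega


theorem pvLt_asymm {α : Type} (k1 k2 : α → Int) {a b : α}
    (h1 : pvLt k1 k2 a b) (h2 : pvLt k1 k2 b a) : False := by
  simp [pvLt] at *; omega

theorem pvSorted2_eq_foldl {α : Type} (xs : List α) (k1 k2 : α → Int) :
    PySem.List.sorted2 xs k1 k2 =
      xs.foldl (fun acc x => PySem.List.insertBy (pvLtB k1 k2) x acc) [] := rfl

theorem pvInsertBy_cons {α : Type} (before : α → α → Bool) (x y : α) (ys : List α) :
    PySem.List.insertBy before x (y :: ys) =
      if before x y then x :: y :: ys else y :: PySem.List.insertBy before x ys := rfl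

theorem pvInsertBy_pairwise {α : Type} (k1 k2 : α → Int) (x : α) : ∀ (l : List α),
    l.Pairwise (pvLt k1 k2) → (∀ b ∈ l, k2 b ≠ k2 x) →
    (PySem.List.insertBy (pvLtB k1 k2) x l).Pairwise (pvLt k1 k2) := by
  intro l
  induction l with
  | nil => intro _ _; simp [PySem.List.insertBy]
  | cons y ys ih =>
    intro hl hx
    rw [pvInsertBy_cons]
    rcases List.pairwise_cons.mp hl with ⟨hy, hys⟩
    by_cases h : pvLtB k1 k2 x y = true
    · rw [if_pos h]
      refine List.pairwise_cons.mpr ⟨?_, hl⟩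
      intro z hz
      rcases List.mem_cons.mp hz with rfl | hz
      · exact (pvLtB_iff k1 k2 x z).mp h
      · exact pvLt_trans k1 k2 ((pvLtB_iff k1 k2 x y).mp h) (hy z hz)
    · rw [if_neg h]
      refine List.pairwise_cons.mpr ⟨?_, ih hys (fun b hb => hx b (List.mem_cons_of_mem _ hb))⟩
      intro z hz
      rcases (PySem.List.mem_insertBy _ x z ys).mp hz with rfl | hz
      · exact pvLt_of_ltB_false k1 k2 (Bool.eq_false_iff.mpr h)
          (fun he => hx y List.mem_cons_self he.symm)
      · exact hy z hz

theorem pvFoldl_insertBy_pairwise {α : Type} (k1 k2 : α → Int) :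
    ∀ (xs acc : List α), acc.Pairwise (pvLt k1 k2) →
      (∀ a ∈ acc, ∀ b ∈ xs, k2 a ≠ k2 b) → (xs.map k2).Nodup →
      (xs.foldl (fun acc x => PySem.List.insertBy (pvLtB k1 k2) x acc) acc).Pairwise (pvLt k1 k2) := by
  intro xs
  induction xs with
  | nil => intro acc h _ _; simpa using h
  | cons x xs ih =>
    intro acc hacc hfresh hnd
    simp only [List.foldl_cons]
    have hnd' : (xs.map k2).Nodup := (List.nodup_cons.mp (by simpa using hnd)).2
    have hxxs : k2 x ∉ xs.map k2 := (List.nodup_cons.mp (by simpa using hnd)).1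
    refine ih _ (pvInsertBy_pairwise k1 k2 x acc hacc
        (fun b hb => hfresh b hb x List.mem_cons_self)) ?_ hnd'
    intro a ha b hb
    rcases (PySem.List.mem_insertBy _ x a acc).mp ha with rfl | ha
    · intro he; exact hxxs (he ▸ List.mem_map_of_mem hb)
    · exact hfresh a ha b (List.mem_cons_of_mem _ hb)


theorem pvSorted2_pairwise {α : Type} (k1 k2 : α → Int) (xs : List α)
    (hnd : (xs.map k2).Nodup) :
    (PySem.List.sorted2 xs k1 k2).Pairwise (pvLt k1 k2) := by
  rw [pvSorted2_eq_foldl]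
  exact pvFoldl_insertBy_pairwise k1 k2 xs [] (List.Pairwise.nil) (by simp) hnd

theorem pvEq_of_perm_of_pairwise {α : Type} (r : α → α → Prop)
    (hasym : ∀ a b, r a b → r b a → False) :
    ∀ {ys zs : List α}, ys.Perm zs → ys.Pairwise r → zs.Pairwise r → ys = zs := by
  intro ys
  induction ys with
  | nil => intro zs hp _ _; simpa using hp.nil_eq.symm
  | cons a ys ih =>
    intro zs hp hys hzs
    cases zs with
    | nil => exact absurd hp.symm.nil_eq (by simp)
    | cons b zs =>
      by_cases hab : a = b
      · subst hab
        exact congrArg (a :: ·) (ih hp.cons_inv (List.pairwise_cons.mp hys).2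
          (List.pairwise_cons.mp hzs).2)
      · exfalso
        have hbmem : b ∈ ys := by
          have : b ∈ a :: ys := hp.mem_iff.mpr List.mem_cons_self
          rcases List.mem_cons.mp this with h | h
          · exact absurd h.symm hab
          · exact h
        have hamem : a ∈ zs := by
          have : a ∈ b :: zs := hp.mem_iff.mp List.mem_cons_self
          rcases List.mem_cons.mp this with h | h
          · exact absurd h hab
          · exact h
        exact hasym a b ((List.pairwise_cons.mp hys).1 b hbmem)
          ((List.pairwise_cons.mp hzs).1 a hamem)


theorem pvSorted2_eq_of_perm {α : Type} (k1 k2 : α → Int) (xs ys : List α)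
    (hperm : ys.Perm xs) (hys : ys.Pairwise (pvLt k1 k2)) (hnd : (xs.map k2).Nodup) :
    PySem.List.sorted2 xs k1 k2 = ys := by
  refine pvEq_of_perm_of_pairwise (pvLt k1 k2) (fun a b => pvLt_asymm k1 k2)
    ?_ (pvSorted2_pairwise k1 k2 xs hnd) hys
  exact ((PySem.List.sorted2_perm xs k1 k2 false).trans hperm.symm)

theorem pvInsertBy_snd {α : Type} (k : α → Int) :
    ∀ (acc : List (Int × α)) (x : α) (n : Int), (∀ a ∈ acc, a.1 < n) →
    (PySem.List.insertBy (pvLtB (fun p => k p.2) (fun p => p.1)) (n, x) acc).map (·.2)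
      = PySem.List.insertBy (fun a b => decide (k a < k b)) x (acc.map (·.2)) := by
  intro acc
  induction acc with
  | nil => intro x n _; rfl
  | cons q qs ih =>
    intro x n hlt
    rw [pvInsertBy_cons, List.map_cons, pvInsertBy_cons]
    have hq : q.1 < n := hlt q List.mem_cons_self
    have hkey : pvLtB (fun p => k p.2) (fun p : Int × α => p.1) (n, x) q = decide (k x < k q.2) := by
      simp [pvLtB]; omega
    rw [hkey]
    by_cases h : decide (k x < k q.2) = true
    · simp [h]
    · simp only [Bool.not_eq_true] at h
      simp only [h, if_false, List.map_cons, decide_false, Bool.false_eq_true]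
      rw [ih x n (fun a ha => hlt a (List.mem_cons_of_mem _ ha))]

theorem pvSorted_decorate_aux {α : Type} (k : α → Int) :
    ∀ (xs : List α) (n : Int) (acc : List (Int × α)), (∀ a ∈ acc, a.1 < n) →
    ((PySem.List.enumerate xs n).foldl
        (fun acc x => PySem.List.insertBy (pvLtB (fun p => k p.2) (fun p => p.1)) x acc) acc).map (·.2)
      = xs.foldl (fun acc x => PySem.List.insertBy (fun a b => decide (k a < k b)) x acc) (acc.map (·.2)) := by
  intro xs
  induction xs with
  | nil => intro n acc _; simp [PySem.List.enumerate_nil]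
  | cons x xs ih =>
    intro n acc hlt
    rw [PySem.List.enumerate_cons]
    simp only [List.foldl_cons]
    rw [ih (n + 1) _ ?_, pvInsertBy_snd k acc x n hlt]
    intro a ha
    rcases (PySem.List.mem_insertBy _ _ a acc).mp ha with rfl | ha
    · omega
    · exact lt_trans (hlt a ha) (by omega)

theorem pvSorted_decorate {α : Type} (k : α → Int) (xs : List α) :
    (PySem.List.sorted2 (PySem.List.enumerate xs 0) (fun p => k p.2) (fun p => p.1)).map (·.2)
      = PySem.List.sorted xs k := by
  rw [show PySem.List.sorted2 (PySem.List.enumerate xs 0) (fun p => k p.2) (fun p => p.1) =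
    (PySem.List.enumerate xs 0).foldl
      (fun acc x => PySem.List.insertBy (pvLtB (fun p => k p.2) (fun p => p.1)) x acc) [] from rfl]
  rw [PySem.List.sorted_eq_foldl_insertBy]
  exact pvSorted_decorate_aux k xs 0 [] (by simp)

def pvStepA' (tm : List (Int × Int)) (d : PySem.Dict Int (PySem.Dict String (Option Int)))
    (r : PvRec) : PySem.Dict Int (PySem.Dict String (Option Int)) :=
  let t := pvTs tm r.1
  let d1 := if PySem.Dict.contains d r.2.1 then d
    else PySem.Dict.modify d r.2.1 pvInnerDefault (fun inner => PySem.Dict.insert inner "seen" (some t))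
  if r.2.2.2 then
    if PySem.Dict.getD (PySem.Dict.getD d1 r.2.1 pvInnerDefault) "killed" none = none then
      PySem.Dict.modify d1 r.2.1 pvInnerDefault (fun inner => PySem.Dict.insert inner "killed" (some t))
    else d1
  else d1

def pvSeenV (tm : List (Int × Int)) (l : List PvRec) (m : Int) : Option Int :=
  (l.find? (fun r => r.2.1 == m)).map (fun r => pvTs tm r.1)

def pvKillV (tm : List (Int × Int)) (l : List PvRec) (m : Int) : Option Int :=
  ((l.filter (fun r => r.2.2.2)).find? (fun r => r.2.1 == m)).map (fun r => pvTs tm r.1)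

def pvEntryA (tm : List (Int × Int)) (l : List PvRec) (m : Int) : PySem.Dict String (Option Int) :=
  PySem.Dict.mk [("seen", pvSeenV tm l m), ("killed", pvKillV tm l m)]

def pvCA (tm : List (Int × Int)) (l : List PvRec) : List (Int × PySem.Dict String (Option Int)) :=
  (PySem.List.dedup (l.map (fun r => r.2.1))).map (fun m => (m, pvEntryA tm l m))

-- inner-dict literal computations
theorem pvInnerGetKilled (sv kv : Option Int) :
    PySem.Dict.getD (PySem.Dict.mk [("seen", sv), ("killed", kv)]) "killed" none = kv := rfl

theorem pvInnerInsSeen (t : Option Int) :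
    PySem.Dict.insert pvInnerDefault "seen" t = PySem.Dict.mk [("seen", t), ("killed", none)] := rfl

theorem pvInnerInsKilled (sv kv t : Option Int) :
    PySem.Dict.insert (PySem.Dict.mk [("seen", sv), ("killed", kv)]) "killed" t
      = PySem.Dict.mk [("seen", sv), ("killed", t)] := rfl

theorem pvKeysCA (tm : List (Int × Int)) (l : List PvRec) :
    (PySem.Dict.mk (pvCA tm l)).keys = PySem.List.dedup (l.map (fun r => r.2.1)) := by
  simp [PySem.Dict.keys, pvCA, List.map_map, Function.comp_def]

theorem pvKeysCA_nodup (tm : List (Int × Int)) (l : List PvRec) :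
    (PySem.Dict.mk (pvCA tm l)).keys.Nodup := by
  rw [pvKeysCA]; exact PySem.Set.nodup_ofList _

theorem pvContainsCA (tm : List (Int × Int)) (l : List PvRec) (m : Int) :
    (PySem.Dict.mk (pvCA tm l)).contains m = true ↔ m ∈ l.map (fun r => r.2.1) := by
  rw [PySem.Dict.contains_iff_mem_keys, pvKeysCA]
  simp [PySem.List.dedup, PySem.Set.mem_ofList]

theorem pvGetCA (tm : List (Int × Int)) (l : List PvRec) (m : Int)
    (hm : m ∈ l.map (fun r => r.2.1)) :
    (PySem.Dict.mk (pvCA tm l)).get? m = some (pvEntryA tm l m) := by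
  apply PySem.Dict.get?_of_mem_items _ _ (pvKeysCA_nodup tm l)
  show (m, pvEntryA tm l m) ∈ pvCA tm l
  refine List.mem_map_of_mem ?_
  rw [PySem.List.dedup_eq_ofList, PySem.Set.mem_ofList]
  exact hm

-- find?-append facts
theorem pvFind_append_mem {l : List PvRec} {m : Int} (r : PvRec)
    (hm : m ∈ l.map (fun r => r.2.1)) :
    (l ++ [r]).find? (fun r => r.2.1 == m) = l.find? (fun r => r.2.1 == m) := by
  rw [List.find?_append]
  rcases List.mem_map.mp hm with ⟨r0, hr0, hr0m⟩
  have : (l.find? (fun r => r.2.1 == m)).isSome := by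
    rw [List.find?_isSome]; exact ⟨r0, hr0, by simp [hr0m]⟩
  rcases Option.isSome_iff_exists.mp this with ⟨v, hv⟩
  simp [hv]

theorem pvFind_none {l : List PvRec} {m : Int}
    (hm : m ∉ l.map (fun r => r.2.1)) :
    l.find? (fun r => r.2.1 == m) = none := by
  rw [List.find?_eq_none]
  intro r hr
  simp only [beq_iff_eq]
  exact fun he => hm (he ▸ List.mem_map_of_mem hr)

theorem pvFilterMut_sub {l : List PvRec} {m : Int}
    (hm : m ∉ l.map (fun r => r.2.1)) :
    m ∉ (l.filter (fun r => r.2.2.2)).map (fun r => r.2.1) := by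
  intro h
  rcases List.mem_map.mp h with ⟨r0, hr0, hr0m⟩
  exact hm (hr0m ▸ List.mem_map_of_mem (List.mem_of_mem_filter hr0))

-- seen/kill value append lemmas
theorem pvSeenV_append_mem (tm : List (Int × Int)) {l : List PvRec} {m : Int} (r : PvRec)
    (hm : m ∈ l.map (fun r => r.2.1)) :
    pvSeenV tm (l ++ [r]) m = pvSeenV tm l m := by
  simp only [pvSeenV, pvFind_append_mem r hm]

theorem pvSeenV_append_fresh (tm : List (Int × Int)) {l : List PvRec} {m : Int} (r : PvRec)
    (hm : m ∉ l.map (fun r => r.2.1)) :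
    pvSeenV tm (l ++ [r]) m = if r.2.1 == m then some (pvTs tm r.1) else none := by
  simp only [pvSeenV, List.find?_append, pvFind_none hm, Option.none_or]
  by_cases h : r.2.1 == m <;> simp [List.find?, h]

theorem pvKillV_append (tm : List (Int × Int)) (l : List PvRec) (m : Int) (r : PvRec) :
    pvKillV tm (l ++ [r]) m =
      if r.2.2.2 && (r.2.1 == m) then (pvKillV tm l m).or (some (pvTs tm r.1))
      else pvKillV tm l m := by
  simp only [pvKillV, List.filter_append]
  by_cases hk : r.2.2.2
  · simp only [hk, List.filter_cons, List.filter_nil, if_pos rfl]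
    rw [List.find?_append]
    by_cases hmm : r.2.1 == m
    · simp only [hk, hmm, Bool.and_self, if_pos rfl]
      cases h : (l.filter (fun r => r.2.2.2)).find? (fun r => r.2.1 == m) <;>
        simp [h, List.find?, hmm, Option.or]
    · simp [List.find?, hmm]
  · rw [Bool.eq_false_iff.mpr hk]
    simp [List.filter_cons, Bool.eq_false_iff.mpr hk]

theorem pvDedup_append_mem {l : List PvRec} {m : Int} (hm : m ∈ l.map (fun r => r.2.1)) (r : PvRec) (hr : r.2.1 = m) :
    PySem.List.dedup ((l ++ [r]).map (fun r => r.2.1)) = PySem.List.dedup (l.map (fun r => r.2.1)) := by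
  rw [List.map_append, List.map_singleton, hr]
  rw [PySem.List.dedup_eq_ofList, PySem.List.dedup_eq_ofList, PySem.Set.ofList_append_singleton]
  exact PySem.Set.add_of_mem (by rw [PySem.Set.mem_ofList]; exact hm)

theorem pvDedup_append_fresh {l : List PvRec} {m : Int} (hm : m ∉ l.map (fun r => r.2.1)) (r : PvRec) (hr : r.2.1 = m) :
    PySem.List.dedup ((l ++ [r]).map (fun r => r.2.1)) = PySem.List.dedup (l.map (fun r => r.2.1)) ++ [m] := by
  rw [List.map_append, List.map_singleton, hr]
  rw [PySem.List.dedup_eq_ofList, PySem.List.dedup_eq_ofList, PySem.Set.ofList_append_singleton]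
  exact PySem.Set.add_of_not_mem (by rw [PySem.Set.mem_ofList]; exact hm)

theorem pvMemDedup {l : List PvRec} {m : Int} :
    m ∈ PySem.List.dedup (l.map (fun r => r.2.1)) ↔ m ∈ l.map (fun r => r.2.1) := by
  rw [PySem.List.dedup_eq_ofList, PySem.Set.mem_ofList]

-- A's scan over a (skip-free) list builds exactly the canonical table pvCA
theorem pvA2 (tm : List (Int × Int)) (l : List PvRec) :
    l.foldl (pvStepA' tm) PySem.Dict.empty = PySem.Dict.mk (pvCA tm l) := by
  induction l using List.reverseRecOn with
  | nil => rfl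
  | append_singleton l r ih =>
    rw [List.foldl_append, List.foldl_cons, List.foldl_nil, ih]
    set m := r.2.1 with hm_def
    set t := pvTs tm r.1 with ht_def
    by_cases hm : m ∈ l.map (fun r => r.2.1)
    · -- mutant already present: d1 = d
      have hcont : (PySem.Dict.mk (pvCA tm l)).contains m = true := (pvContainsCA tm l m).mpr hm
      have hget : PySem.Dict.getD (PySem.Dict.mk (pvCA tm l)) m pvInnerDefault = pvEntryA tm l m :=
        PySem.Dict.getD_of_get?_eq_some _ _ (pvGetCA tm l m hm)
      rw [pvStepA']
      simp only [← hm_def, ← ht_def, hcont, hget, eq_self_iff_true, if_true]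
      by_cases hk : r.2.2.2
      · -- killed record
        simp only [hk, eq_self_iff_true, if_true, pvEntryA, pvInnerGetKilled]
        by_cases hkv : pvKillV tm l m = none
        · -- first kill of m
          rw [if_pos hkv]
          rw [PySem.Dict.modify, hget, pvEntryA, pvInnerInsKilled]
          apply PySem.Dict.ext
          rw [PySem.Dict.items_insert_of_contains _ _ hcont]
          show (pvCA tm l).map _ = pvCA tm (l ++ [r])
          rw [pvCA, List.map_map, pvCA, pvDedup_append_mem hm r rfl]
          refine List.map_congr_left (fun m' hm' => ?_)
          have hm'l : m' ∈ l.map (fun r => r.2.1) := pvMemDedup.mp hm'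
          by_cases hmm : m' = m
          · subst hmm
            simp only [Function.comp_def, beq_self_eq_true, eq_self_iff_true, if_true]
            rw [pvEntryA, pvSeenV_append_mem tm r hm'l, pvKillV_append]
            simp only [hk, beq_self_eq_true, Bool.and_self, eq_self_iff_true, if_true, hkv,
              Option.none_or]
            simp [← ht_def, ← hm_def]
          · simp only [Function.comp_def, beq_iff_eq, if_neg hmm]
            rw [pvEntryA, pvEntryA, pvSeenV_append_mem tm r hm'l, pvKillV_append]
            have : (r.2.2.2 && (r.2.1 == m')) = false := by
              simp [hk, show r.2.1 ≠ m' from fun he => hmm (he.symm.trans hm_def.symm)]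
            rw [this, if_neg (by simp)]
        · -- m already killed: no change
          rw [if_neg hkv]
          apply PySem.Dict.ext
          show pvCA tm l = pvCA tm (l ++ [r])
          rw [pvCA, pvCA, pvDedup_append_mem hm r rfl]
          refine List.map_congr_left (fun m' hm' => ?_)
          have hm'l : m' ∈ l.map (fun r => r.2.1) := pvMemDedup.mp hm'
          rw [pvEntryA, pvEntryA, pvSeenV_append_mem tm r hm'l, pvKillV_append]
          by_cases hmm : m' = m
          · subst hmm
            cases h : pvKillV tm l m with
            | none => exact absurd h hkv
            | some c => simp [h, hk, Option.or]
          · have : (r.2.2.2 && (r.2.1 == m')) = false := by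
              simp [hk, show r.2.1 ≠ m' from fun he => hmm (he.symm.trans hm_def.symm)]
            rw [this, if_neg (by simp)]
      · -- not killed: no change
        simp only [Bool.eq_false_iff.mpr hk, Bool.false_eq_true, eq_self_iff_true, if_true, if_false]
        apply PySem.Dict.ext
        show pvCA tm l = pvCA tm (l ++ [r])
        rw [pvCA, pvCA, pvDedup_append_mem hm r rfl]
        refine List.map_congr_left (fun m' hm' => ?_)
        have hm'l : m' ∈ l.map (fun r => r.2.1) := pvMemDedup.mp hm'
        rw [pvEntryA, pvEntryA, pvSeenV_append_mem tm r hm'l, pvKillV_append]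
        rw [show (r.2.2.2 && (r.2.1 == m')) = false by simp [Bool.eq_false_iff.mpr hk], if_neg (by simp)]
    · -- fresh mutant
      have hcont : (PySem.Dict.mk (pvCA tm l)).contains m = false := by
        rw [← Bool.not_eq_true, (pvContainsCA tm l m)]; exact hm
      have hget0 : PySem.Dict.getD (PySem.Dict.mk (pvCA tm l)) m pvInnerDefault = pvInnerDefault :=
        PySem.Dict.getD_of_not_contains _ _ hcont
      rw [pvStepA']
      simp only [← hm_def, ← ht_def, hcont, Bool.false_eq_true, if_false]
      
      rw [PySem.Dict.modify, hget0, pvInnerInsSeen]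
      set v1 := PySem.Dict.mk [("seen", some t), ("killed", (none : Option Int))] with hv1
      have hget1 : PySem.Dict.getD ((PySem.Dict.mk (pvCA tm l)).insert m v1) m pvInnerDefault = v1 :=
        PySem.Dict.getD_of_get?_eq_some _ _ (PySem.Dict.get?_insert_self _ _ _)
      have hfreshitems : ∀ w, ((PySem.Dict.mk (pvCA tm l)).insert m w).items = pvCA tm l ++ [(m, w)] :=
        fun w => PySem.Dict.items_insert_of_not_contains _ _ hcont
      have htail : ∀ m', m' ∈ PySem.List.dedup (l.map (fun r => r.2.1)) →
          (m', pvEntryA tm l m') = (m', pvEntryA tm (l ++ [r]) m') := by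
        intro m' hm'
        have hm'l : m' ∈ l.map (fun r => r.2.1) := pvMemDedup.mp hm'
        have hmm : m' ≠ m := fun he => hm (he ▸ hm'l)
        rw [pvEntryA, pvEntryA, pvSeenV_append_mem tm r hm'l, pvKillV_append]
        rw [show (r.2.2.2 && (r.2.1 == m')) = false by
          rw [show (r.2.1 == m') = false by
            simp [show r.2.1 ≠ m' from fun he => hmm (he.symm.trans hm_def.symm)]]
          simp, if_neg (by simp)]
      have hnewseen : pvSeenV tm (l ++ [r]) m = some t := by
        rw [pvSeenV_append_fresh tm r hm]
        simp [← hm_def, ← ht_def]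
      by_cases hk : r.2.2.2
      · simp only [hk, eq_self_iff_true, if_true, hget1]
        rw [if_pos (show v1.getD "killed" none = none from rfl)]
        rw [PySem.Dict.modify, hget1, hv1, pvInnerInsKilled, PySem.Dict.insert_insert_self]
        apply PySem.Dict.ext
        rw [hfreshitems]
        show _ = pvCA tm (l ++ [r])
        rw [show pvCA tm (l ++ [r]) = (PySem.List.dedup (l.map (fun r => r.2.1))).map
              (fun m' => (m', pvEntryA tm (l ++ [r]) m')) ++ [(m, pvEntryA tm (l ++ [r]) m)] from by
          rw [pvCA, pvDedup_append_fresh hm r rfl, List.map_append, List.map_singleton]]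
        refine congrArg₂ (· ++ ·) ?_ ?_
        · rw [pvCA]; exact List.map_congr_left htail
        · congr 1
          rw [pvEntryA, hnewseen, pvKillV_append]
          simp only [hk, Bool.true_and]
          rw [show (r.2.1 == m) = true by simp [← hm_def], if_pos rfl]
          rw [pvKillV, pvFind_none (pvFilterMut_sub hm)]
          rfl
      · simp only [Bool.eq_false_iff.mpr hk, Bool.false_eq_true, eq_self_iff_true, if_true, if_false]
        apply PySem.Dict.ext
        rw [hfreshitems]
        show _ = pvCA tm (l ++ [r])
        rw [show pvCA tm (l ++ [r]) = (PySem.List.dedup (l.map (fun r => r.2.1))).map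
              (fun m' => (m', pvEntryA tm (l ++ [r]) m')) ++ [(m, pvEntryA tm (l ++ [r]) m)] from by
          rw [pvCA, pvDedup_append_fresh hm r rfl, List.map_append, List.map_singleton]]
        refine congrArg₂ (· ++ ·) ?_ ?_
        · rw [pvCA]; exact List.map_congr_left htail
        · congr 1
          rw [pvEntryA, hnewseen, pvKillV_append]
          rw [show (r.2.2.2 && (r.2.1 == m)) = false by simp [Bool.eq_false_iff.mpr hk],
            if_neg (by simp)]
          rw [pvKillV, pvFind_none (pvFilterMut_sub hm)]
          rfl

-- ================== B side ==================

def pvInit (tm : List (Int × Int)) (p : PvElt) : Int × Int × Option Int :=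
  (pvTs tm p.2.1, p.1, if p.2.2.2.2 then some (pvTs tm p.2.1) else none)

def pvUpd (tm : List (Int × Int)) (e : Int × Int × Option Int) (p : PvElt) : Int × Int × Option Int :=
  let t := pvTs tm p.2.1
  let s := if t < e.1 then (t, p.1) else (e.1, e.2.1)
  let k := if p.2.2.2.2 then
      match e.2.2 with
      | none => some t
      | some c => if t < c then some t else some c
    else e.2.2
  (s.1, s.2, k)

-- non-skip body of B's first loop
def pvStepB' (tm : List (Int × Int)) (b : PySem.Dict Int (Int × Int × Option Int))
    (p : PvElt) : PySem.Dict Int (Int × Int × Option Int) :=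
  let t := pvTs tm p.2.1
  match PySem.Dict.get? b p.2.2.1 with
  | none => PySem.Dict.insert b p.2.2.1 (t, p.1, if p.2.2.2.2 then some t else none)
  | some e =>
    let s := if t < e.1 then (t, p.1) else (e.1, e.2.1)
    let k := if p.2.2.2.2 then
        match e.2.2 with
        | none => some t
        | some c => if t < c then some t else some c
      else e.2.2
    PySem.Dict.insert b p.2.2.1 (s.1, s.2, k)

theorem pvStepB'_eq (tm : List (Int × Int)) (b : PySem.Dict Int (Int × Int × Option Int)) (p : PvElt) :
    pvStepB' tm b p = PySem.Dict.insert b p.2.2.1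
      (match PySem.Dict.get? b p.2.2.1 with
       | none => pvInit tm p
       | some e => pvUpd tm e p) := by
  cases h : PySem.Dict.get? b p.2.2.1 <;> simp [pvStepB', pvInit, pvUpd, h]

def pvGrp (l : List PvElt) (m : Int) : List PvElt := l.filter (fun p => p.2.2.1 == m)

def pvAggD (tm : List (Int × Int)) (g : List PvElt) : Int × Int × Option Int :=
  match g with
  | [] => (0, 0, none)
  | p :: rest => rest.foldl (pvUpd tm) (pvInit tm p)

def pvCB (tm : List (Int × Int)) (l : List PvElt) : List (Int × (Int × Int × Option Int)) :=
  (PySem.List.dedup (l.map (fun p => p.2.2.1))).map (fun m => (m, pvAggD tm (pvGrp l m)))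

theorem pvKeysCB (tm : List (Int × Int)) (l : List PvElt) :
    (PySem.Dict.mk (pvCB tm l)).keys = PySem.List.dedup (l.map (fun p => p.2.2.1)) := by
  simp [PySem.Dict.keys, pvCB, List.map_map, Function.comp_def]

theorem pvKeysCB_nodup (tm : List (Int × Int)) (l : List PvElt) :
    (PySem.Dict.mk (pvCB tm l)).keys.Nodup := by
  rw [pvKeysCB]; exact PySem.Set.nodup_ofList _

theorem pvContainsCB (tm : List (Int × Int)) (l : List PvElt) (m : Int) :
    (PySem.Dict.mk (pvCB tm l)).contains m = true ↔ m ∈ l.map (fun p => p.2.2.1) := by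
  rw [PySem.Dict.contains_iff_mem_keys, pvKeysCB]
  simp [PySem.List.dedup, PySem.Set.mem_ofList]

theorem pvGetCB (tm : List (Int × Int)) (l : List PvElt) (m : Int)
    (hm : m ∈ l.map (fun p => p.2.2.1)) :
    (PySem.Dict.mk (pvCB tm l)).get? m = some (pvAggD tm (pvGrp l m)) := by
  apply PySem.Dict.get?_of_mem_items _ _ (pvKeysCB_nodup tm l)
  show (m, pvAggD tm (pvGrp l m)) ∈ pvCB tm l
  refine List.mem_map_of_mem ?_
  rw [PySem.List.dedup_eq_ofList, PySem.Set.mem_ofList]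
  exact hm

theorem pvGetCB_none (tm : List (Int × Int)) (l : List PvElt) (m : Int)
    (hm : m ∉ l.map (fun p => p.2.2.1)) :
    (PySem.Dict.mk (pvCB tm l)).get? m = none := by
  rw [PySem.Dict.get?_eq_none_iff_not_mem_keys, pvKeysCB, PySem.List.dedup_eq_ofList,
    PySem.Set.mem_ofList]
  exact hm

theorem pvGrp_append (l : List PvElt) (p : PvElt) (m : Int) :
    pvGrp (l ++ [p]) m = pvGrp l m ++ (if p.2.2.1 == m then [p] else []) := by
  rw [pvGrp, List.filter_append, pvGrp]
  congr 1
  by_cases h : p.2.2.1 == m <;> simp [h]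

theorem pvGrp_eq_nil (l : List PvElt) (m : Int) (hm : m ∉ l.map (fun p => p.2.2.1)) :
    pvGrp l m = [] := by
  rw [pvGrp, List.filter_eq_nil_iff]
  intro p hp
  simp only [beq_iff_eq]
  exact fun he => hm (he ▸ List.mem_map_of_mem hp)

theorem pvGrp_ne_nil (l : List PvElt) (m : Int) (hm : m ∈ l.map (fun p => p.2.2.1)) :
    pvGrp l m ≠ [] := by
  rcases List.mem_map.mp hm with ⟨p, hp, hpm⟩
  intro h
  have : p ∈ pvGrp l m := List.mem_filter.mpr ⟨hp, by simp [hpm]⟩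
  rw [h] at this
  exact absurd this (List.not_mem_nil)

theorem pvAggD_append (tm : List (Int × Int)) (g : List PvElt) (p : PvElt) (hg : g ≠ []) :
    pvAggD tm (g ++ [p]) = pvUpd tm (pvAggD tm g) p := by
  cases g with
  | nil => exact absurd rfl hg
  | cons q rest => simp [pvAggD, List.foldl_append]

theorem pvDedupE_append_mem {l : List PvElt} {m : Int} (hm : m ∈ l.map (fun p => p.2.2.1))
    (p : PvElt) (hp : p.2.2.1 = m) :
    PySem.List.dedup ((l ++ [p]).map (fun p => p.2.2.1)) = PySem.List.dedup (l.map (fun p => p.2.2.1)) := by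
  rw [List.map_append, List.map_singleton, hp]
  rw [PySem.List.dedup_eq_ofList, PySem.List.dedup_eq_ofList, PySem.Set.ofList_append_singleton]
  exact PySem.Set.add_of_mem (by rw [PySem.Set.mem_ofList]; exact hm)

theorem pvDedupE_append_fresh {l : List PvElt} {m : Int} (hm : m ∉ l.map (fun p => p.2.2.1))
    (p : PvElt) (hp : p.2.2.1 = m) :
    PySem.List.dedup ((l ++ [p]).map (fun p => p.2.2.1))
      = PySem.List.dedup (l.map (fun p => p.2.2.1)) ++ [m] := by
  rw [List.map_append, List.map_singleton, hp]
  rw [PySem.List.dedup_eq_ofList, PySem.List.dedup_eq_ofList, PySem.Set.ofList_append_singleton]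
  exact PySem.Set.add_of_not_mem (by rw [PySem.Set.mem_ofList]; exact hm)

theorem pvMemDedupE {l : List PvElt} {m : Int} :
    m ∈ PySem.List.dedup (l.map (fun p => p.2.2.1)) ↔ m ∈ l.map (fun p => p.2.2.1) := by
  rw [PySem.List.dedup_eq_ofList, PySem.Set.mem_ofList]

theorem pvB1 (tm : List (Int × Int)) (l : List PvElt) :
    l.foldl (pvStepB' tm) PySem.Dict.empty = PySem.Dict.mk (pvCB tm l) := by
  induction l using List.reverseRecOn with
  | nil => rfl
  | append_singleton l p ih =>
    rw [List.foldl_append, List.foldl_cons, List.foldl_nil, ih, pvStepB'_eq]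
    set m := p.2.2.1 with hm_def
    by_cases hm : m ∈ l.map (fun p => p.2.2.1)
    · rw [pvGetCB tm l m hm]
      have hcont : (PySem.Dict.mk (pvCB tm l)).contains m = true := (pvContainsCB tm l m).mpr hm
      apply PySem.Dict.ext
      rw [PySem.Dict.items_insert_of_contains _ _ hcont]
      show (pvCB tm l).map _ = pvCB tm (l ++ [p])
      rw [pvCB, List.map_map, pvCB, pvDedupE_append_mem hm p rfl]
      refine List.map_congr_left (fun m' hm' => ?_)
      by_cases hmm : m' = m
      · subst hmm
        simp only [Function.comp_def, beq_self_eq_true, eq_self_iff_true, if_true]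
        rw [pvGrp_append, show (p.2.2.1 == m) = true by simp [← hm_def], if_pos rfl]
        rw [pvAggD_append tm _ p (pvGrp_ne_nil l m hm)]
      · simp only [Function.comp_def, beq_iff_eq, if_neg hmm]
        rw [pvGrp_append, show (p.2.2.1 == m') = false by
          simp [show p.2.2.1 ≠ m' from fun he => hmm (he.symm.trans hm_def.symm)], if_neg (by simp)]
        rw [List.append_nil]
    · rw [pvGetCB_none tm l m hm]
      have hcont : (PySem.Dict.mk (pvCB tm l)).contains m = false := by
        rw [← Bool.not_eq_true, pvContainsCB tm l m]; exact hm
      apply PySem.Dict.ext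
      rw [PySem.Dict.items_insert_of_not_contains _ _ hcont]
      show pvCB tm l ++ [(m, pvInit tm p)] = pvCB tm (l ++ [p])
      rw [show pvCB tm (l ++ [p]) = (PySem.List.dedup (l.map (fun p => p.2.2.1))).map
            (fun m' => (m', pvAggD tm (pvGrp (l ++ [p]) m'))) ++ [(m, pvAggD tm (pvGrp (l ++ [p]) m))] from by
        rw [pvCB, pvDedupE_append_fresh hm p rfl, List.map_append, List.map_singleton]]
      refine congrArg₂ (· ++ ·) ?_ ?_
      · rw [pvCB]
        refine List.map_congr_left (fun m' hm' => ?_)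
        have hmm : m' ≠ m := fun he => hm (he ▸ pvMemDedupE.mp hm')
        rw [pvGrp_append, show (p.2.2.1 == m') = false by
          simp [show p.2.2.1 ≠ m' from fun he => hmm (he.symm.trans hm_def.symm)], if_neg (by simp)]
        rw [List.append_nil]
      · congr 1
        rw [pvGrp_append, show (p.2.2.1 == m) = true by simp [← hm_def], if_pos rfl]
        rw [pvGrp_eq_nil l m hm, List.nil_append]
        rfl

-- components of pvUpd
theorem pvUpd_seen_lt (tm : List (Int × Int)) (e : Int × Int × Option Int) (p : PvElt)
    (h : pvTs tm p.2.1 < e.1) :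
    (pvUpd tm e p).1 = pvTs tm p.2.1 ∧ (pvUpd tm e p).2.1 = p.1 := by
  simp [pvUpd, h]

theorem pvUpd_seen_ge (tm : List (Int × Int)) (e : Int × Int × Option Int) (p : PvElt)
    (h : ¬ pvTs tm p.2.1 < e.1) :
    (pvUpd tm e p).1 = e.1 ∧ (pvUpd tm e p).2.1 = e.2.1 := by
  simp [pvUpd, h]

theorem pvAggD_seen_spec (tm : List (Int × Int)) :
    ∀ g : List PvElt, g.Pairwise (fun p q => p.1 < q.1) → g ≠ [] →
    ∃ ps ∈ g, (pvAggD tm g).1 = pvTs tm ps.2.1 ∧ (pvAggD tm g).2.1 = ps.1 ∧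
      ∀ q ∈ g, ps = q ∨ pvLt (fun x : PvElt => pvTs tm x.2.1) (fun x : PvElt => x.1) ps q := by
  intro g
  induction g using List.reverseRecOn with
  | nil => intro _ h; exact absurd rfl h
  | append_singleton g p ih =>
    intro hpw _
    rcases List.pairwise_append.mp hpw with ⟨hg, _, hcross⟩
    by_cases hgn : g = []
    · subst hgn
      refine ⟨p, by simp, by simp [pvAggD, pvInit], by simp [pvAggD, pvInit], ?_⟩
      intro q hq
      left
      exact (List.mem_singleton.mp hq).symm
    · rw [pvAggD_append tm g p hgn]
      rcases ih hg hgn with ⟨ps, hps, h1, h2, hmin⟩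
      by_cases ht : pvTs tm p.2.1 < (pvAggD tm g).1
      · refine ⟨p, by simp, (pvUpd_seen_lt tm _ p ht).1, (pvUpd_seen_lt tm _ p ht).2, ?_⟩
        intro q hq
        rcases List.mem_append.mp hq with hq | hq
        · have hle : pvTs tm ps.2.1 ≤ pvTs tm q.2.1 := by
            rcases hmin q hq with rfl | hlt
            · omega
            · simp only [pvLt] at hlt; omega
          right
          simp only [pvLt]
          omega
        · left; simpa using (List.mem_singleton.mp hq).symm
      · refine ⟨ps, List.mem_append_left _ hps,
          by rw [(pvUpd_seen_ge tm _ p ht).1, h1],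
          by rw [(pvUpd_seen_ge tm _ p ht).2, h2], ?_⟩
        intro q hq
        rcases List.mem_append.mp hq with hq | hq
        · exact hmin q hq
        · rw [List.mem_singleton.mp hq]
          rw [h1] at ht
          have hx := hcross ps hps p (by simp)
          right
          simp only [pvLt]
          omega

theorem pvUpd_kill (tm : List (Int × Int)) (e : Int × Int × Option Int) (p : PvElt) :
    (pvUpd tm e p).2.2 = if p.2.2.2.2 then
        (match e.2.2 with
         | none => some (pvTs tm p.2.1)
         | some c => if pvTs tm p.2.1 < c then some (pvTs tm p.2.1) else some c)
      else e.2.2 := by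
  simp [pvUpd]

theorem pvAggD_kill_spec (tm : List (Int × Int)) :
    ∀ g : List PvElt, g ≠ [] →
    ((pvAggD tm g).2.2 = none ∧ ∀ q ∈ g, q.2.2.2.2 = false) ∨
    (∃ c, (pvAggD tm g).2.2 = some c ∧ (∃ q ∈ g, q.2.2.2.2 = true ∧ pvTs tm q.2.1 = c) ∧
      ∀ q ∈ g, q.2.2.2.2 = true → c ≤ pvTs tm q.2.1) := by
  intro g
  induction g using List.reverseRecOn with
  | nil => intro h; exact absurd rfl h
  | append_singleton g p ih =>
    intro _
    by_cases hgn : g = []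
    · subst hgn
      by_cases hk : p.2.2.2.2
      · right
        exact ⟨pvTs tm p.2.1, by simp [pvAggD, pvInit, hk], ⟨p, by simp, hk, rfl⟩,
          by intro q hq _; rw [List.mem_singleton.mp hq]⟩
      · left
        constructor
        · simp [pvAggD, pvInit, hk]
        · intro q hq; rw [List.mem_singleton.mp hq]; exact Bool.eq_false_iff.mpr hk
    · rw [pvAggD_append tm g p hgn, pvUpd_kill]
      by_cases hk : p.2.2.2.2
      · rw [if_pos hk]
        right
        rcases ih hgn with ⟨hnone, hall⟩ | ⟨c, hc, ⟨qw, hqw, hqwk, hqwt⟩, hmin⟩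
        · rw [hnone]
          refine ⟨pvTs tm p.2.1, rfl, ⟨p, by simp, hk, rfl⟩, ?_⟩
          intro q hq hqk
          rcases List.mem_append.mp hq with hq | hq
          · rw [hall q hq] at hqk; exact absurd hqk (by simp)
          · rw [List.mem_singleton.mp hq]
        · simp only [hc]
          by_cases ht : pvTs tm p.2.1 < c
          · rw [if_pos ht]
            refine ⟨pvTs tm p.2.1, rfl, ⟨p, by simp, hk, rfl⟩, ?_⟩
            intro q hq hqk
            rcases List.mem_append.mp hq with hq | hq
            · have := hmin q hq hqk; omega
            · rw [List.mem_singleton.mp hq]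
          · rw [if_neg ht]
            refine ⟨c, rfl, ⟨qw, List.mem_append_left _ hqw, hqwk, hqwt⟩, ?_⟩
            intro q hq hqk
            rcases List.mem_append.mp hq with hq | hq
            · exact hmin q hq hqk
            · rw [List.mem_singleton.mp hq]; omega
      · rw [if_neg hk]
        rcases ih hgn with ⟨hnone, hall⟩ | ⟨c, hc, hw, hmin⟩
        · left
          refine ⟨hnone, ?_⟩
          intro q hq
          rcases List.mem_append.mp hq with hq | hq
          · exact hall q hq
          · rw [List.mem_singleton.mp hq]; exact Bool.eq_false_iff.mpr hk
        · right
          refine ⟨c, hc, ⟨hw.choose, List.mem_append_left _ hw.choose_spec.1, hw.choose_spec.2⟩, ?_⟩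
          intro q hq hqk
          rcases List.mem_append.mp hq with hq | hq
          · exact hmin q hq hqk
          · rw [List.mem_singleton.mp hq] at hqk; exact absurd hqk (Bool.eq_false_iff.mpr hk ▸ by simp)

-- find? facts on PvElt lists
theorem pvFindE_append_mem {l : List PvElt} {m : Int} (p : PvElt)
    (hm : m ∈ l.map (fun x => x.2.2.1)) :
    (l ++ [p]).find? (fun x => x.2.2.1 == m) = l.find? (fun x => x.2.2.1 == m) := by
  rw [List.find?_append]
  rcases List.mem_map.mp hm with ⟨x0, hx0, hx0m⟩
  have : (l.find? (fun x => x.2.2.1 == m)).isSome := by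
    rw [List.find?_isSome]; exact ⟨x0, hx0, by simp [hx0m]⟩
  rcases Option.isSome_iff_exists.mp this with ⟨v, hv⟩
  simp [hv]

theorem pvFindE_none {l : List PvElt} {m : Int}
    (hm : m ∉ l.map (fun x => x.2.2.1)) :
    l.find? (fun x => x.2.2.1 == m) = none := by
  rw [List.find?_eq_none]
  intro x hx
  simp only [beq_iff_eq]
  exact fun he => hm (he ▸ List.mem_map_of_mem hx)

theorem pvDedupPairwise (tm : List (Int × Int)) :
    ∀ N : List PvElt, N.Pairwise (pvLt (fun x : PvElt => pvTs tm x.2.1) (fun x : PvElt => x.1)) →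
    (PySem.List.dedup (N.map (fun x => x.2.2.1))).Pairwise
      (fun m m' => ∀ x y, N.find? (fun z => z.2.2.1 == m) = some x →
        N.find? (fun z => z.2.2.1 == m') = some y →
        pvLt (fun z : PvElt => pvTs tm z.2.1) (fun z : PvElt => z.1) x y) := by
  intro N
  induction N using List.reverseRecOn with
  | nil => intro _; exact List.Pairwise.nil
  | append_singleton N p ih =>
    intro hpw
    rcases List.pairwise_append.mp hpw with ⟨hg, _, hcross⟩
    set m := p.2.2.1 with hm_def
    by_cases hm : m ∈ N.map (fun x => x.2.2.1)
    · rw [pvDedupE_append_mem hm p rfl]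
      refine (ih hg).imp_of_mem (fun {m1 m2} h1 h2 hR => ?_)
      intro x y hx hy
      rw [pvFindE_append_mem p (pvMemDedupE.mp h1)] at hx
      rw [pvFindE_append_mem p (pvMemDedupE.mp h2)] at hy
      exact hR x y hx hy
    · rw [pvDedupE_append_fresh hm p rfl]
      refine List.pairwise_append.mpr ⟨?_, List.pairwise_cons.mpr ⟨fun b hb => absurd hb List.not_mem_nil, List.Pairwise.nil⟩, ?_⟩
      · refine (ih hg).imp_of_mem (fun {m1 m2} h1 h2 hR => ?_)
        intro x y hx hy
        rw [pvFindE_append_mem p (pvMemDedupE.mp h1)] at hx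
        rw [pvFindE_append_mem p (pvMemDedupE.mp h2)] at hy
        exact hR x y hx hy
      · intro m1 h1 m2 h2
        rw [List.mem_singleton.mp h2]
        intro x y hx hy
        rw [pvFindE_append_mem p (pvMemDedupE.mp h1)] at hx
        rw [List.find?_append, pvFindE_none hm] at hy
        simp only [Option.none_or] at hy
        have hy' : y = p := by
          have : (([p]).find? (fun z => z.2.2.1 == m)) = some p := by
            simp [List.find?, ← hm_def]
          rw [this] at hy; exact (Option.some.injEq _ _).mp hy.symm
        rw [hy']
        exact hcross x (List.mem_of_find?_eq_some hx) p (by simp)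

theorem pvK2 (tm : List (Int × Int)) (N N0 : List PvElt)
    (hNpw : N.Pairwise (pvLt (fun x : PvElt => pvTs tm x.2.1) (fun x : PvElt => x.1)))
    (hperm : N.Perm N0)
    (hN0idx : N0.Pairwise (fun p q => p.1 < q.1))
    (m : Int) (hm : m ∈ N.map (fun x => x.2.2.1)) :
    ∃ p0, N.find? (fun x => x.2.2.1 == m) = some p0 ∧
      (pvAggD tm (pvGrp N0 m)).1 = pvTs tm p0.2.1 ∧
      (pvAggD tm (pvGrp N0 m)).2.1 = p0.1 ∧
      (pvAggD tm (pvGrp N0 m)).2.2 =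
        ((N.filter (fun x => x.2.2.2.2)).find? (fun x => x.2.2.1 == m)).map
          (fun x => pvTs tm x.2.1) := by
  have hGperm : (pvGrp N m).Perm (pvGrp N0 m) := hperm.filter _
  have hm0 : m ∈ N0.map (fun x => x.2.2.1) := ((hperm.map _).mem_iff).mp hm
  have hg0ne : pvGrp N0 m ≠ [] := pvGrp_ne_nil _ _ hm0
  have hg0idx : (pvGrp N0 m).Pairwise (fun p q => p.1 < q.1) :=
    List.Pairwise.sublist List.filter_sublist hN0idx
  rcases pvAggD_seen_spec tm _ hg0idx hg0ne with ⟨ps, hps, h1, h2, hmin⟩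
  have hgNne : pvGrp N m ≠ [] := by
    intro h
    exact hg0ne (List.Perm.nil_eq (h ▸ hGperm)).symm
  have hfind : N.find? (fun x => x.2.2.1 == m) = (pvGrp N m).head? := by
    rw [pvGrp]; exact List.head?_filter.symm
  have hgNpw : (pvGrp N m).Pairwise
      (pvLt (fun x : PvElt => pvTs tm x.2.1) (fun x : PvElt => x.1)) :=
    List.Pairwise.sublist List.filter_sublist hNpw
  cases hgN : pvGrp N m with
  | nil => exact absurd hgN hgNne
  | cons p0 rest =>
    rw [hgN] at hfind hGperm hgNpw
    have hp0min : ∀ q ∈ p0 :: rest, p0 = q ∨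
        pvLt (fun x : PvElt => pvTs tm x.2.1) (fun x : PvElt => x.1) p0 q := by
      intro q hq
      rcases List.mem_cons.mp hq with rfl | hq
      · exact Or.inl rfl
      · exact Or.inr ((List.pairwise_cons.mp hgNpw).1 q hq)
    have hpse : ps = p0 := by
      have hpsN : ps ∈ p0 :: rest := hGperm.mem_iff.mpr hps
      have hp0g0 : p0 ∈ pvGrp N0 m := hGperm.mem_iff.mp List.mem_cons_self
      rcases hmin p0 hp0g0 with h | hlt
      · exact h
      · rcases hp0min ps hpsN with h | hlt2
        · exact h.symm
        · exact absurd hlt (fun hl => pvLt_asymm _ _ hl hlt2)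
    refine ⟨p0, by rw [hfind]; rfl, by rw [h1, hpse], by rw [h2, hpse], ?_⟩
    -- killed component
    have hkfilt : (N.filter (fun x => x.2.2.2.2)).find? (fun x => x.2.2.1 == m)
        = ((p0 :: rest).filter (fun x => x.2.2.2.2)).head? := by
      rw [← hgN, pvGrp, ← List.head?_filter, List.filter_filter, List.filter_filter]
      exact congrArg List.head? (List.filter_congr (fun a _ => by simp [Bool.and_comm]))
    rcases pvAggD_kill_spec tm _ hg0ne with ⟨hnone, hall⟩ | ⟨c, hc, ⟨qw, hqw, hqwk, hqwt⟩, hminK⟩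
    · rw [hnone, hkfilt]
      have : (p0 :: rest).filter (fun x => x.2.2.2.2) = [] := by
        rw [List.filter_eq_nil_iff]
        intro q hq
        have : q ∈ pvGrp N0 m := hGperm.mem_iff.mp hq
        simp [hall q this]
      rw [this]
      rfl
    · rw [hc, hkfilt]
      have hqwk' : qw ∈ (p0 :: rest).filter (fun x => x.2.2.2.2) := by
        refine List.mem_filter.mpr ⟨hGperm.mem_iff.mpr hqw, by simp [hqwk]⟩
      cases hkg : (p0 :: rest).filter (fun x => x.2.2.2.2) with
      | nil => rw [hkg] at hqwk'; exact absurd hqwk' (List.not_mem_nil)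
      | cons q0 krest =>
        have hkpw : (q0 :: krest).Pairwise
            (pvLt (fun x : PvElt => pvTs tm x.2.1) (fun x : PvElt => x.1)) := by
          rw [← hkg]; exact List.Pairwise.sublist List.filter_sublist hgNpw
        have hq0mem : q0 ∈ pvGrp N0 m ∧ q0.2.2.2.2 = true := by
          have : q0 ∈ (p0 :: rest).filter (fun x => x.2.2.2.2) := by rw [hkg]; exact List.mem_cons_self
          rcases List.mem_filter.mp this with ⟨hq0, hq0k⟩
          exact ⟨hGperm.mem_iff.mp hq0, hq0k⟩
        have hle1 : c ≤ pvTs tm q0.2.1 := hminK q0 hq0mem.1 hq0mem.2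
        have hle2 : pvTs tm q0.2.1 ≤ c := by
          rw [hkg] at hqwk'
          rcases List.mem_cons.mp hqwk' with rfl | hqwrest
          · omega
          · have := (List.pairwise_cons.mp hkpw).1 qw hqwrest
            simp only [pvLt] at this
            omega
        rw [show some c = Option.map (fun x : PvElt => pvTs tm x.2.1) (q0 :: krest).head? ↔
              some c = some (pvTs tm q0.2.1) from Iff.rfl]
        rw [show pvTs tm q0.2.1 = c from le_antisymm hle2 hle1]



theorem pvStepA_eq (tm : List (Int × Int)) (d : PySem.Dict Int (PySem.Dict String (Option Int))) (r : PvRec) :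
    gfckStepA tm d r = if (!r.2.2.1) = true then pvStepA' tm d r else d := by
  cases h : r.2.2.1 <;> simp [gfckStepA, pvStepA', h]

theorem pvStepB_eq (tm : List (Int × Int)) (b : PySem.Dict Int (Int × Int × Option Int)) (p : PvElt) :
    gfckStepB tm b p = if (!p.2.2.2.1) = true then pvStepB' tm b p else b := by
  cases h : p.2.2.2.1 <;> simp [gfckStepB, pvStepB', h]

theorem pvSorted_decorate_ts (tm : List (Int × Int)) (results : List PvRec) :
    (PySem.List.sorted2 (PySem.List.enumerate results 0)
        (fun p : PvElt => pvTs tm p.2.1) (fun p : PvElt => p.1)).map (·.2)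
      = PySem.List.sorted results (fun x => pvTs tm x.1) :=
  pvSorted_decorate (fun x : PvRec => pvTs tm x.1) results

def pvM (results : List PvRec) (tm : List (Int × Int)) : List PvElt :=
  PySem.List.sorted2 (PySem.List.enumerate results 0)
    (fun p : PvElt => pvTs tm p.2.1) (fun p : PvElt => p.1)

def pvN (results : List PvRec) (tm : List (Int × Int)) : List PvElt :=
  (pvM results tm).filter (fun p => !p.2.2.2.1)

def pvN0 (results : List PvRec) : List PvElt :=
  (PySem.List.enumerate results 0).filter (fun p => !p.2.2.2.1)

theorem pvMain (results : List PvRec) (tm : List (Int × Int)) :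
    get_first_covered_killed results tm = get_first_covered_killed_alt results tm := by
  have hEnd : ((PySem.List.enumerate results 0).map (fun p : PvElt => p.1)).Nodup := by
    rw [PySem.List.map_fst_enumerate]
    exact PySem.List.nodup_pyRange_one _ _
  have hMperm : (pvM results tm).Perm (PySem.List.enumerate results 0) :=
    PySem.List.sorted2_perm _ _ _ _
  have hMpw : (pvM results tm).Pairwise
      (pvLt (fun x : PvElt => pvTs tm x.2.1) (fun x : PvElt => x.1)) :=
    pvSorted2_pairwise _ _ _ hEnd
  have hNpw : (pvN results tm).Pairwise
      (pvLt (fun x : PvElt => pvTs tm x.2.1) (fun x : PvElt => x.1)) :=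
    List.Pairwise.sublist List.filter_sublist hMpw
  have hNperm : (pvN results tm).Perm (pvN0 results) := hMperm.filter _
  have hN0idx : (pvN0 results).Pairwise (fun p q => p.1 < q.1) :=
    List.Pairwise.sublist List.filter_sublist (PySem.List.pairwise_lt_enumerate results 0)
  have hNfst : ((pvN results tm).map (fun p : PvElt => p.1)).Nodup := by
    refine List.Nodup.sublist (List.Sublist.map _ List.filter_sublist) ?_
    exact ((hMperm.map _).nodup_iff).mpr hEnd
  have hK2 := pvK2 tm (pvN results tm) (pvN0 results) hNpw hNperm hN0idx
  -- dedup lists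
  have hndN : (PySem.List.dedup ((pvN results tm).map (fun p => p.2.2.1))).Nodup := by
    rw [PySem.List.dedup_eq_ofList]; exact PySem.Set.nodup_ofList _
  have hndN0 : (PySem.List.dedup ((pvN0 results).map (fun p => p.2.2.1))).Nodup := by
    rw [PySem.List.dedup_eq_ofList]; exact PySem.Set.nodup_ofList _
  have hdd : (PySem.List.dedup ((pvN results tm).map (fun p => p.2.2.1))).Perm
      (PySem.List.dedup ((pvN0 results).map (fun p => p.2.2.1))) := by
    refine (List.perm_ext_iff_of_nodup hndN hndN0).mpr (fun a => ?_)
    rw [pvMemDedupE, pvMemDedupE]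
    exact (hNperm.map _).mem_iff
  -- the sorted-by-(first time, first index) list of per-mutant aggregates
  have hTB : PySem.List.sorted2 (pvCB tm (pvN0 results))
      (fun kv => kv.2.1) (fun kv => kv.2.2.1)
      = (PySem.List.dedup ((pvN results tm).map (fun p => p.2.2.1))).map
          (fun m => (m, pvAggD tm (pvGrp (pvN0 results) m))) := by
    refine pvSorted2_eq_of_perm _ _ _ _ ?_ ?_ ?_
    · exact hdd.map _
    · refine List.pairwise_map.mpr ?_
      refine (pvDedupPairwise tm _ hNpw).imp_of_mem (fun {m1 m2} h1 h2 hR => ?_)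
      rcases hK2 m1 (pvMemDedupE.mp h1) with ⟨p1, hf1, e11, e12, _⟩
      rcases hK2 m2 (pvMemDedupE.mp h2) with ⟨p2, hf2, e21, e22, _⟩
      have := hR p1 p2 hf1 hf2
      simp only [pvLt] at this ⊢
      rw [e11, e12, e21, e22]
      exact this
    · rw [pvCB, List.map_map]
      show ((PySem.List.dedup ((pvN0 results).map (fun p => p.2.2.1))).map
        (fun m => (pvAggD tm (pvGrp (pvN0 results) m)).2.1)).Nodup
      show List.Pairwise Ne _
      refine List.pairwise_map.mpr ?_
      refine hndN0.imp_of_mem (fun {m1 m2} h1 h2 hne => ?_)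
      have hm1 : m1 ∈ (pvN results tm).map (fun p => p.2.2.1) := by
        rw [(hNperm.map _).mem_iff]; exact pvMemDedupE.mp h1
      have hm2 : m2 ∈ (pvN results tm).map (fun p => p.2.2.1) := by
        rw [(hNperm.map _).mem_iff]; exact pvMemDedupE.mp h2
      rcases hK2 m1 hm1 with ⟨p1, hf1, _, e12, _⟩
      rcases hK2 m2 hm2 with ⟨p2, hf2, _, e22, _⟩
      rw [e12, e22]
      intro he
      have hp : p1 = p2 :=
        List.inj_on_of_nodup_map hNfst (List.mem_of_find?_eq_some hf1)
          (List.mem_of_find?_eq_some hf2) he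
      have h1' : p1.2.2.1 = m1 := by simpa using List.find?_some hf1
      have h2' : p2.2.2.1 = m2 := by simpa using List.find?_some hf2
      exact hne (h1' ▸ h2' ▸ hp ▸ rfl)
  -- the two pipelines
  show ((PySem.List.sorted results (fun x => pvTs tm x.1)).foldl (gfckStepA tm) PySem.Dict.empty).items.map
      (fun kv => (kv.1, PySem.Dict.items kv.2))
    = ((PySem.List.sorted2 ((PySem.List.enumerate results 0).foldl (gfckStepB tm) PySem.Dict.empty).items
          (fun kv => kv.2.1) (fun kv => kv.2.2.1)).foldl
        (fun o kv => PySem.Dict.insert o kv.1 (PySem.Dict.mk [("seen", some kv.2.1), ("killed", kv.2.2.2)]))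
        PySem.Dict.empty).items.map (fun kv => (kv.1, PySem.Dict.items kv.2))
  -- A side
  rw [← pvSorted_decorate_ts tm results]
  rw [PySem.List.foldl_congr_mem _ (gfckStepA tm)
      (fun d r => if (!r.2.2.1) = true then pvStepA' tm d r else d) PySem.Dict.empty
      (fun acc x _ => pvStepA_eq tm acc x)]
  rw [PySem.List.foldl_if_eq_foldl_filter (fun r : PvRec => !r.2.2.1) (pvStepA' tm)]
  rw [show ((PySem.List.sorted2 (PySem.List.enumerate results 0)
        (fun p : PvElt => pvTs tm p.2.1) (fun p : PvElt => p.1)).map (·.2)).filter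
        (fun r : PvRec => !r.2.2.1) = (pvN results tm).map (·.2) from by
    rw [List.filter_map]; rfl]
  rw [pvA2 tm]
  -- B side
  rw [PySem.List.foldl_congr_mem _ (gfckStepB tm)
      (fun b p => if (!p.2.2.2.1) = true then pvStepB' tm b p else b) PySem.Dict.empty
      (fun acc x _ => pvStepB_eq tm acc x)]
  rw [PySem.List.foldl_if_eq_foldl_filter (fun p : PvElt => !p.2.2.2.1) (pvStepB' tm)]
  rw [show (PySem.List.enumerate results 0).filter (fun p : PvElt => !p.2.2.2.1) = pvN0 results from rfl]
  rw [pvB1 tm]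
  rw [show (PySem.Dict.mk (pvCB tm (pvN0 results))).items = pvCB tm (pvN0 results) from rfl]
  rw [hTB]
  have hnd2 : ((((PySem.List.dedup ((pvN results tm).map (fun p => p.2.2.1))).map
      (fun m => (m, pvAggD tm (pvGrp (pvN0 results) m)))).map
        (fun kv : Int × (Int × Int × Option Int) => kv.1))).Nodup := by
    have h : (((PySem.List.dedup ((pvN results tm).map (fun p => p.2.2.1))).map
        (fun m => (m, pvAggD tm (pvGrp (pvN0 results) m)))).map
          (fun kv : Int × (Int × Int × Option Int) => kv.1))
        = PySem.List.dedup ((pvN results tm).map (fun p => p.2.2.1)) := by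
      rw [List.map_map]; exact List.map_id _
    rw [h]; exact hndN
  rw [PySem.Dict.items_foldl_insert_fresh
      ((PySem.List.dedup ((pvN results tm).map (fun p => p.2.2.1))).map
          (fun m => (m, pvAggD tm (pvGrp (pvN0 results) m))))
      (fun kv => kv.1)
      (fun kv => PySem.Dict.mk [("seen", some kv.2.1), ("killed", kv.2.2.2)])
      PySem.Dict.empty (fun a _ => rfl) hnd2]
  rw [show (PySem.Dict.empty : PySem.Dict Int (PySem.Dict String (Option Int))).items
      = ([] : List (Int × PySem.Dict String (Option Int))) from rfl]
  rw [List.nil_append]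
  -- compare the two tables pointwise over the same mutant order
  rw [pvCA]
  rw [show ((pvN results tm).map (fun x : PvElt => x.2)).map (fun r : PvRec => r.2.1)
      = (pvN results tm).map (fun p => p.2.2.1) from by rw [List.map_map]; rfl]
  rw [List.map_map, List.map_map, List.map_map]
  refine List.map_congr_left (fun m hm => ?_)
  have hmN : m ∈ (pvN results tm).map (fun p => p.2.2.1) := pvMemDedupE.mp hm
  rcases hK2 m hmN with ⟨p0, hf, e1, e2, e3⟩
  have hseen : pvSeenV tm ((pvN results tm).map (·.2)) m
      = ((pvN results tm).find? (fun x => x.2.2.1 == m)).map (fun x => pvTs tm x.2.1) := by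
    rw [pvSeenV, List.find?_map, Option.map_map]; rfl
  have hkill : pvKillV tm ((pvN results tm).map (·.2)) m
      = (((pvN results tm).filter (fun x => x.2.2.2.2)).find? (fun x => x.2.2.1 == m)).map
          (fun x => pvTs tm x.2.1) := by
    rw [pvKillV, List.filter_map, List.find?_map, Option.map_map]; rfl
  show (m, (pvEntryA tm ((pvN results tm).map (·.2)) m).items)
      = (m, [("seen", some (pvAggD tm (pvGrp (pvN0 results) m)).1),
             ("killed", (pvAggD tm (pvGrp (pvN0 results) m)).2.2)])
  rw [show (pvEntryA tm ((pvN results tm).map (·.2)) m).items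
      = [("seen", pvSeenV tm ((pvN results tm).map (·.2)) m),
         ("killed", pvKillV tm ((pvN results tm).map (·.2)) m)] from rfl]
  rw [hseen, hkill, hf, e1, e3]
  rfl

-- ===== VERDICT =====

theorem get_first_covered_killed_spec : Claim_equal_get_first_covered_killed := by
  intro results timestamps_map _ _
  show get_first_covered_killed results timestamps_map
      = get_first_covered_killed_alt results timestamps_map
  exact pvMain results timestamps_map
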